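-- pv_equiv track=rewrite | github.com/RuochenKong/ML_Project | feature.py | head_generate
-- ===== SOURCE A (Python) =====
-- def head_generate(channelNum,detec = 1):
-- 	fh = ''
-- 	'''
-- 	for i in range(channelNum*2):
-- 		fh+='fft_%2d,'%(i+1)
-- 	'''
-- 	bh = ''
-- 	th = ''
-- 	meh = ''
-- 	mmh = ''
-- 	for i in range(channelNum):
-- 		meh += 'mean_C%2d,'%(i+1)
-- 		mmh += 'max-min_C%2d,'%(i+1)
-- 		bh += 'delta_C%2d,'%(i+1)+'theta_C%2d,'%(i+1)+'alpha_C%2d,'%(i+1)\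
-- 		+'beta_C%2d,'%(i+1)+'low_gamma_C%2d,'%(i+1)+'high_gamma_C%2d,'%(i+1)
-- 		th += 'hjorth_mobility_C%2d,'%(i+1)+'hjorth_complexity_C%2d,'%(i+1)
-- 		if detec == 1:
-- 			th += 'hfd_C%2d,'%(i+1)
-- 		th +='pfd_C%2d'%(i+1)
-- 		if i != channelNum-1:
-- 			th += ','
--
-- 	res = '1,latency,' + meh + mmh + fh + bh + th
--
-- 	return res
-- ===== SOURCE B (Python) =====
-- BAND_PREFIXES = ['delta_C', 'theta_C', 'alpha_C', 'beta_C', 'low_gamma_C', 'high_gamma_C']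
--
--
-- def _time_cols(i, detec):
--     cols = ['hjorth_mobility_C%2d' % (i + 1), 'hjorth_complexity_C%2d' % (i + 1)]
--     if detec == 1:
--         cols.append('hfd_C%2d' % (i + 1))
--     cols.append('pfd_C%2d' % (i + 1))
--     return cols
--
--
-- def head_generate(channelNum, detec=1):
--     rng = range(channelNum)
--     means = ['mean_C%2d' % (i + 1) for i in rng]
--     maxmins = ['max-min_C%2d' % (i + 1) for i in rng]
--     bands = [p + '%2d' % (i + 1) for i in rng for p in BAND_PREFIXES]
--     times = [c for i in rng for c in _time_cols(i, detec)]
--     return '1,latency,' + ','.join(means + maxmins + bands + times)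
-- ===== Notes on version B (the rewrite author's own statement) =====
-- stated objective: simpler
-- what changed: Replaces the four interleaved string accumulators and the special-case trailing-comma branch with building the ordered list of column names (means, max-mins, band columns, time columns) and one ','.join after the fixed '1,latency,' prefix.
import Mathlib
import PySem

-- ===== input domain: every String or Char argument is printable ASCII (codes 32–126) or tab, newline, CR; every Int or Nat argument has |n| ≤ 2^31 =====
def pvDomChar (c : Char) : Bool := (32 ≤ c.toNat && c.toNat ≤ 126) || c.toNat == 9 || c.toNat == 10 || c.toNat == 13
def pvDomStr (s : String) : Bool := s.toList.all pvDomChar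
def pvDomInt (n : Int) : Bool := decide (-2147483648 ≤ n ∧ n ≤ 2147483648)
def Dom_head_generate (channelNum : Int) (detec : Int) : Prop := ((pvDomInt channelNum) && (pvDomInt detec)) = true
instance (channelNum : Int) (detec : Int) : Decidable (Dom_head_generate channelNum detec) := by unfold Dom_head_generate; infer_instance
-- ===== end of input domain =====

-- B builds the ordered list of column names and emits them with one ','.join after the fixed
-- '1,latency,' prefix, instead of A's four interleaved string accumulators with a trailing-comma branch.

-- shared formatting helper: '%2d' % n (space-pad to width 2; str(n) already has ≥ 2 chars otherwise)
def pct2d (n : Int) : String :=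
  if 0 ≤ n ∧ n < 10 then " " ++ PySem.Int.toStr n else PySem.Int.toStr n

-- ===== PORT A =====
-- loop body of A's 'for i in range(channelNum)' over the state (meh, mmh, bh, th)
def stepA (channelNum : Int) (detec : Int)
    (st : String × String × String × String) (i : Int) : String × String × String × String :=
  (st.1 ++ "mean_C" ++ pct2d (i+1) ++ ",",
   st.2.1 ++ "max-min_C" ++ pct2d (i+1) ++ ",",
   st.2.2.1 ++ "delta_C" ++ pct2d (i+1) ++ "," ++ "theta_C" ++ pct2d (i+1) ++ ","
     ++ "alpha_C" ++ pct2d (i+1) ++ "," ++ "beta_C" ++ pct2d (i+1) ++ ","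
     ++ "low_gamma_C" ++ pct2d (i+1) ++ "," ++ "high_gamma_C" ++ pct2d (i+1) ++ ",",
   if i ≠ channelNum - 1 then
     (if detec = 1 then
        st.2.2.2 ++ "hjorth_mobility_C" ++ pct2d (i+1) ++ "," ++ "hjorth_complexity_C" ++ pct2d (i+1) ++ ","
          ++ "hfd_C" ++ pct2d (i+1) ++ ","
      else
        st.2.2.2 ++ "hjorth_mobility_C" ++ pct2d (i+1) ++ "," ++ "hjorth_complexity_C" ++ pct2d (i+1) ++ ",")
       ++ "pfd_C" ++ pct2d (i+1) ++ ","
   else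
     (if detec = 1 then
        st.2.2.2 ++ "hjorth_mobility_C" ++ pct2d (i+1) ++ "," ++ "hjorth_complexity_C" ++ pct2d (i+1) ++ ","
          ++ "hfd_C" ++ pct2d (i+1) ++ ","
      else
        st.2.2.2 ++ "hjorth_mobility_C" ++ pct2d (i+1) ++ "," ++ "hjorth_complexity_C" ++ pct2d (i+1) ++ ",")
       ++ "pfd_C" ++ pct2d (i+1))

def head_generate (channelNum : Int) (detec : Int) : String :=
  -- fh stays '' (its fft loop is commented out in the source)
  let fh := ""
  let st := (PySem.List.pyRange 0 channelNum 1).foldl (stepA channelNum detec) ("", "", "", "")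
  "1,latency," ++ st.1 ++ st.2.1 ++ fh ++ st.2.2.1 ++ st.2.2.2

-- ===== PORT B =====
def bandPrefixes : List String := ["delta_C", "theta_C", "alpha_C", "beta_C", "low_gamma_C", "high_gamma_C"]

def timeCols (i : Int) (detec : Int) : List String :=
  (["hjorth_mobility_C" ++ pct2d (i+1), "hjorth_complexity_C" ++ pct2d (i+1)]
    ++ (if detec = 1 then ["hfd_C" ++ pct2d (i+1)] else []))
    ++ ["pfd_C" ++ pct2d (i+1)]

def head_generate_alt (channelNum : Int) (detec : Int) : String :=
  let rng := PySem.List.pyRange 0 channelNum 1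
  let means := rng.map (fun i => "mean_C" ++ pct2d (i+1))
  let maxmins := rng.map (fun i => "max-min_C" ++ pct2d (i+1))
  let bands := rng.flatMap (fun i => bandPrefixes.map (fun p => p ++ pct2d (i+1)))
  let times := rng.flatMap (fun i => timeCols i detec)
  "1,latency," ++ PySem.Str.join "," (means ++ maxmins ++ bands ++ times)

-- ===== PRECONDITION & SPEC =====
def Spec_head_generate (channelNum : Int) (detec : Int) (out : String) : Prop := out = head_generate_alt channelNum detec
instance (channelNum : Int) (detec : Int) (out : String) : Decidable (Spec_head_generate channelNum detec out) := by unfold Spec_head_generate; infer_instance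

-- ===== CLAIM (what is proved, stated in full; the proofs are below) =====
def Claim_equal_head_generate : Prop := ∀ (channelNum : Int) (detec : Int), Dom_head_generate channelNum detec → Spec_head_generate channelNum detec (head_generate channelNum detec)

-- ===== LEMMAS AND PROOFS =====

-- proof-side helpers
def scat : List String → String
  | [] => ""
  | s :: l => s ++ scat l

def mcol (i : Int) : String := "mean_C" ++ pct2d (i+1)
def mmcol (i : Int) : String := "max-min_C" ++ pct2d (i+1)
def bstr (i : Int) : String := PySem.Str.join "," (bandPrefixes.map (fun p => p ++ pct2d (i+1)))
def tstr (d : Int) (i : Int) : String := PySem.Str.join "," (timeCols i d)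
def tif (c d : Int) (i : Int) : String := if i = c - 1 then tstr d i else tstr d i ++ ","

theorem scat_cons (s : String) (l : List String) : scat (s :: l) = s ++ scat l := rfl

theorem scat_singleton (s : String) : scat [s] = s := by
  apply String.toList_inj.mp; simp [scat]

theorem join_nilS : PySem.Str.join "," ([] : List String) = "" := by
  apply String.toList_inj.mp; simp [PySem.Str.toList_join]

theorem join_singletonS (x : String) : PySem.Str.join "," [x] = x := by
  apply String.toList_inj.mp; simp [PySem.Str.toList_join]

theorem join_ccS (x y : String) (rest : List String) :
    PySem.Str.join "," (x :: y :: rest) = x ++ "," ++ PySem.Str.join "," (y :: rest) := by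
  apply String.toList_inj.mp; simp [PySem.Str.toList_join, PySem.Chars.join_cons_cons]

theorem scat_append (l1 l2 : List String) : scat (l1 ++ l2) = scat l1 ++ scat l2 := by
  induction l1 with
  | nil => apply String.toList_inj.mp; simp [scat]
  | cons x l ih => apply String.toList_inj.mp; simp [scat, ih]

theorem joinLast (l : List String) (x : String) :
    PySem.Str.join "," (l ++ [x]) = scat (l.map (· ++ ",")) ++ x := by
  induction l with
  | nil => apply String.toList_inj.mp; simp [scat, join_singletonS]
  | cons a l ih =>
    cases l with
    | nil => apply String.toList_inj.mp; simp [scat, join_ccS, join_singletonS]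
    | cons b l' =>
      simp only [List.cons_append] at ih ⊢
      rw [join_ccS, ih, List.map_cons, scat_cons]
      apply String.toList_inj.mp
      simp [scat]

theorem commaCat (cols : List String) (h : cols ≠ []) :
    scat (cols.map (· ++ ",")) = PySem.Str.join "," cols ++ "," := by
  induction cols with
  | nil => exact absurd rfl h
  | cons x l ih =>
    cases l with
    | nil => apply String.toList_inj.mp; simp [scat, join_singletonS]
    | cons b l' =>
      rw [List.map_cons, scat_cons, ih (by simp), join_ccS]
      apply String.toList_inj.mp
      simp

theorem join_appendS (l1 l2 : List String) (h1 : l1 ≠ []) (h2 : l2 ≠ []) :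
    PySem.Str.join "," (l1 ++ l2) = PySem.Str.join "," l1 ++ "," ++ PySem.Str.join "," l2 := by
  induction l1 with
  | nil => exact absurd rfl h1
  | cons x l ih =>
    cases l with
    | nil =>
      cases l2 with
      | nil => exact absurd rfl h2
      | cons y l2' =>
        rw [List.singleton_append, join_ccS, join_singletonS]
    | cons b l' =>
      have ih' := ih (by simp)
      simp only [List.cons_append] at ih' ⊢
      rw [join_ccS, ih', join_ccS x b l']
      apply String.toList_inj.mp
      simp

theorem join_flatMapS (g : Int → List String) (l : List Int) (h : ∀ i ∈ l, g i ≠ []) :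
    PySem.Str.join "," (l.flatMap g) = PySem.Str.join "," (l.map (fun i => PySem.Str.join "," (g i))) := by
  induction l with
  | nil => rfl
  | cons x l ih =>
    cases l with
    | nil =>
      simp only [List.flatMap_cons, List.flatMap_nil, List.append_nil, List.map_cons, List.map_nil]
      rw [join_singletonS]
    | cons y l' =>
      have hfm : (y :: l').flatMap g ≠ [] := by
        simp only [List.flatMap_cons]
        intro hc
        exact h y (by simp) (List.append_eq_nil_iff.mp hc).1
      rw [List.flatMap_cons, join_appendS _ _ (h x (by simp)) hfm,
        ih (fun i hi => h i (by simp [hi]))]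
      rw [show List.map (fun i => PySem.Str.join "," (g i)) (x :: y :: l')
            = PySem.Str.join "," (g x) :: PySem.Str.join "," (g y) :: List.map (fun i => PySem.Str.join "," (g i)) l' from rfl,
        join_ccS, List.map_cons]

theorem timeCols_ne_nil (i d : Int) : timeCols i d ≠ [] := by
  unfold timeCols; split <;> simp

-- the th increment of one loop step equals tif
theorem step_th (c d : Int) (t : String) (i : Int) :
    (if i ≠ c - 1 then
       (if d = 1 then
          t ++ "hjorth_mobility_C" ++ pct2d (i+1) ++ "," ++ "hjorth_complexity_C" ++ pct2d (i+1) ++ ","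
            ++ "hfd_C" ++ pct2d (i+1) ++ ","
        else
          t ++ "hjorth_mobility_C" ++ pct2d (i+1) ++ "," ++ "hjorth_complexity_C" ++ pct2d (i+1) ++ ",")
         ++ "pfd_C" ++ pct2d (i+1) ++ ","
     else
       (if d = 1 then
          t ++ "hjorth_mobility_C" ++ pct2d (i+1) ++ "," ++ "hjorth_complexity_C" ++ pct2d (i+1) ++ ","
            ++ "hfd_C" ++ pct2d (i+1) ++ ","
        else
          t ++ "hjorth_mobility_C" ++ pct2d (i+1) ++ "," ++ "hjorth_complexity_C" ++ pct2d (i+1) ++ ",")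
         ++ "pfd_C" ++ pct2d (i+1)) = t ++ tif c d i := by
  by_cases hi : i = c - 1 <;> by_cases hd : d = 1 <;>
    (apply String.toList_inj.mp;
     simp [hi, hd, tif, tstr, timeCols, join_ccS, join_singletonS])

theorem foldA (c d : Int) (l : List Int) (st : String × String × String × String) :
    l.foldl (stepA c d) st =
      (st.1 ++ scat (l.map (fun i => mcol i ++ ",")),
       st.2.1 ++ scat (l.map (fun i => mmcol i ++ ",")),
       st.2.2.1 ++ scat (l.map (fun i => bstr i ++ ",")),
       st.2.2.2 ++ scat (l.map (tif c d))) := by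
  induction l generalizing st with
  | nil =>
    apply Prod.ext <;> [skip; apply Prod.ext <;> [skip; apply Prod.ext]] <;>
      apply String.toList_inj.mp <;> simp [scat]
  | cons x l ih =>
    rw [List.foldl_cons, ih]
    dsimp only [stepA]
    have hth := step_th c d st.2.2.2 x
    apply Prod.ext
    · apply String.toList_inj.mp; simp [scat, mcol]
    apply Prod.ext
    · apply String.toList_inj.mp; simp [scat, mmcol]
    apply Prod.ext
    · apply String.toList_inj.mp
      simp only [List.map_cons, scat_cons]
      simp [bstr, bandPrefixes, join_ccS, join_singletonS]
    · rw [hth]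
      apply String.toList_inj.mp
      simp only [List.map_cons, scat_cons]
      simp

theorem main_eq (c d : Int) : head_generate c d = head_generate_alt c d := by
  simp only [head_generate, head_generate_alt]
  rw [foldA]
  by_cases hc : c ≤ 0
  · have hr : PySem.List.pyRange 0 c 1 = [] := by
      rw [PySem.List.pyRange_one]
      have h0 : (c - 0).toNat = 0 := by omega
      rw [h0]
      simp
    rw [hr]
    apply String.toList_inj.mp
    simp [scat, join_nilS]
  · have h1 : (0:Int) ≤ c - 1 := by omega
    have hceq : c - 1 + 1 = c := by omega
    have hr : PySem.List.pyRange 0 c 1 = PySem.List.pyRange 0 (c-1) 1 ++ [c-1] := by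
      conv_lhs => rw [← hceq]
      exact PySem.List.pyRange_one_succ_right h1
    set r0 := PySem.List.pyRange 0 (c-1) 1 with hr0
    have hmem : ∀ i ∈ r0, i ≠ c - 1 := by
      intro i hi
      have := (PySem.List.mem_pyRange_one).mp hi
      omega
    have hlam_m : (fun i : Int => "mean_C" ++ pct2d (i+1)) = mcol := rfl
    have hlam_mm : (fun i : Int => "max-min_C" ++ pct2d (i+1)) = mmcol := rfl
    have hlam_b : (fun i : Int => PySem.Str.join "," (bandPrefixes.map (fun p => p ++ pct2d (i+1)))) = bstr := rfl
    have hlam_t : (fun i : Int => PySem.Str.join "," (timeCols i d)) = tstr d := rfl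
    -- A side: th accumulator is the ','-join of the per-channel time strings
    have e1 : r0.map (tif c d) = (r0.map (tstr d)).map (fun y => y ++ ",") := by
      rw [List.map_map]
      apply List.map_congr_left
      intro i hi
      simp [tif, hmem i hi]
    have hth : scat ((PySem.List.pyRange 0 c 1).map (tif c d)) =
        PySem.Str.join "," ((PySem.List.pyRange 0 c 1).map (tstr d)) := by
      rw [hr, List.map_append, List.map_append, scat_append, List.map_singleton,
        List.map_singleton, scat_singleton, e1, joinLast]
      simp [tif]
    -- A side: the three comma-terminated groups
    have hne : r0 ++ [c-1] ≠ [] := by simp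
    have hgroup : ∀ f : Int → String,
        scat ((PySem.List.pyRange 0 c 1).map (fun i => f i ++ ",")) =
          PySem.Str.join "," ((PySem.List.pyRange 0 c 1).map f) ++ "," := by
      intro f
      rw [show (PySem.List.pyRange 0 c 1).map (fun i => f i ++ ",")
            = ((PySem.List.pyRange 0 c 1).map f).map (fun y => y ++ ",") by rw [List.map_map]; rfl]
      exact commaCat _ (by rw [hr]; simp)
    -- B side: flatMaps as joins of per-channel joins
    have hbandsB : PySem.Str.join "," ((PySem.List.pyRange 0 c 1).flatMap
          (fun i => bandPrefixes.map (fun p => p ++ pct2d (i+1)))) =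
        PySem.Str.join "," ((PySem.List.pyRange 0 c 1).map bstr) := by
      rw [join_flatMapS _ _ (by intro i _; simp [bandPrefixes])]
      rw [show (fun i : Int => PySem.Str.join "," (bandPrefixes.map (fun p => p ++ pct2d (i+1)))) = bstr from rfl]
    have htimesB : PySem.Str.join "," ((PySem.List.pyRange 0 c 1).flatMap
          (fun i => timeCols i d)) =
        PySem.Str.join "," ((PySem.List.pyRange 0 c 1).map (tstr d)) := by
      rw [join_flatMapS _ _ (by intro i _; exact timeCols_ne_nil i d)]
      rw [show (fun i : Int => PySem.Str.join "," (timeCols i d)) = tstr d from rfl]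
    -- B side: split the single join into the four groups
    have hmapne : ∀ (f : Int → String), (PySem.List.pyRange 0 c 1).map f ≠ [] := by
      intro f; rw [hr]; simp
    have hfmb : (PySem.List.pyRange 0 c 1).flatMap
        (fun i => bandPrefixes.map (fun p => p ++ pct2d (i+1))) ≠ [] := by
      rw [hr]; simp [bandPrefixes]
    have hfmt : (PySem.List.pyRange 0 c 1).flatMap (fun i => timeCols i d) ≠ [] := by
      rw [hr]
      simp only [List.flatMap_append, List.flatMap_cons, List.flatMap_nil, List.append_nil]
      intro hcon
      exact timeCols_ne_nil (c-1) d (List.append_eq_nil_iff.mp hcon).2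
    rw [hlam_m, hlam_mm]
    have hA : List.map mcol (PySem.List.pyRange 0 c 1) ++ List.map mmcol (PySem.List.pyRange 0 c 1)
        ++ (PySem.List.pyRange 0 c 1).flatMap (fun i => bandPrefixes.map (fun p => p ++ pct2d (i+1))) ≠ [] := by
      intro hcon
      exact hmapne _ (List.append_eq_nil_iff.mp (List.append_eq_nil_iff.mp hcon).1).1
    have hB : List.map mcol (PySem.List.pyRange 0 c 1) ++ List.map mmcol (PySem.List.pyRange 0 c 1) ≠ [] := by
      intro hcon
      exact hmapne _ (List.append_eq_nil_iff.mp hcon).1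
    rw [join_appendS _ _ hA hfmt, join_appendS _ _ hB hfmb,
      join_appendS _ _ (hmapne _) (hmapne _),
      hbandsB, htimesB, hth, hgroup mcol, hgroup mmcol, hgroup bstr]
    apply String.toList_inj.mp
    simp

-- ===== VERDICT (by name: the statement is the Claim_ definition above) =====
theorem head_generate_spec : Claim_equal_head_generate := by
  intro c d _
  unfold Spec_head_generate
  exact main_eq c d
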